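-- pv_equiv track=rewrite | github.com/anony-nestedRE/iterPrompt | prompt_policy.py | convert_entity
-- ===== SOURCE A (Python) =====
-- def convert_entity(words, entities):
--     converted_entities = []
--     c_idx2w_idx = []  # character idx -> word idx
--     for i in range(len(words)):
--         c_idx2w_idx.extend([i] * len(words[i]))
--     for e in entities:
--         converted_entities.append((e[0], (c_idx2w_idx[e[1][0] + 5], c_idx2w_idx[e[1][1] + 5])))
--     return converted_entities
-- ===== SOURCE B (Python) =====
-- def _bisect_right(a, x):
--     lo, hi = 0, len(a)
--     while lo < hi:
--         mid = (lo + hi) // 2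
--         if x < a[mid]:
--             hi = mid
--         else:
--             lo = mid + 1
--     return lo
--
--
-- def _word_index(ends, pos):
--     total = ends[-1] if ends else 0
--     if not 0 <= pos < total:
--         raise ValueError("character position %d out of range" % pos)
--     return _bisect_right(ends, pos)
--
--
-- def convert_entity(words, entities):
--     ends = []  # cumulative end position of each word
--     total = 0
--     for w in words:
--         total += len(w)
--         ends.append(total)
--     return [(name, (_word_index(ends, s + 5), _word_index(ends, e + 5)))
--             for name, (s, e) in entities]
-- ===== Notes on version B (the rewrite author's own statement) =====
-- stated objective: faster
-- what changed: B replaces A's per-character table (one entry per character of every word, then direct list indexing) by cumulative word-end positions and a binary search per entity boundary; Pre_ excludes entities with a negative shifted boundary (a character position before the text), where A's value comes from Python's negative list indexing wrapping around while B rejects the position.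
-- outside the precondition, e.g. on convert_entity(['ab', 'c'], [('x', (-6, -6))]): A returns [('x', (1, 1))], B raises ValueError
import Mathlib
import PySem

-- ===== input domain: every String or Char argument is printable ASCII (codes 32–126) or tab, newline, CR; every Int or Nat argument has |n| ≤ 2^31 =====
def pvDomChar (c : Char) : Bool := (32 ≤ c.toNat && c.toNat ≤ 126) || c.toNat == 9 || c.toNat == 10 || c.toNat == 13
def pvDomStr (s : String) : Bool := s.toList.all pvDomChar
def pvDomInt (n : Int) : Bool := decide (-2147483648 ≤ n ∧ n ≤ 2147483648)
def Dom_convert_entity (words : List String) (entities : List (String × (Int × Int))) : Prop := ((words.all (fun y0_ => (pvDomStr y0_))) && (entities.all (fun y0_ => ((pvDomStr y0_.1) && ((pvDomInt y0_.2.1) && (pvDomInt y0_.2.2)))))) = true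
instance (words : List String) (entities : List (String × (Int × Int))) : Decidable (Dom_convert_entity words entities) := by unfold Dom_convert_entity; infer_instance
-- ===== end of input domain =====

-- B replaces A's explicit character-index → word-index table (one entry per character of every
-- word) by cumulative word-end positions plus a binary search per entity boundary.

-- ===== PORT A =====
-- 'for i in range(len(words)): c.extend([i] * len(words[i]))' ported over the identical
-- index/value sequence PySem.List.enumerate words (i, words[i]); the entity loop is a foldl
-- appending one converted entity per step, with xs[j] as PySem.List.pyGetD (total under Pre_).
def convert_entity (words : List String) (entities : List (String × (Int × Int))) : List (String × (Int × Int)) :=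
  let c : List Int :=
    (PySem.List.enumerate words).foldl
      (fun acc p => acc ++ List.replicate (PySem.Str.len p.2).toNat p.1) []
  entities.foldl
    (fun acc e =>
      acc ++ [(e.1, (PySem.List.pyGetD c (e.2.1 + 5) 0, PySem.List.pyGetD c (e.2.2 + 5) 0))]) []

-- ===== PORT B =====
-- Source B's hand-written _bisect_right is CPython's bisect_right loop, which is exactly
-- PySem.List.bisectRight (the prelude's Python-exact primitive). Source B's _word_index raises
-- ValueError outside [0, total); under Pre_ that branch never fires, so the port is the
-- remaining computation.
def convert_entity_alt (words : List String) (entities : List (String × (Int × Int))) : List (String × (Int × Int)) :=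
  let et : List Int × Int :=
    words.foldl (fun et w => (et.1 ++ [et.2 + PySem.Str.len w], et.2 + PySem.Str.len w)) ([], 0)
  entities.map (fun e =>
    (e.1, ((PySem.List.bisectRight et.1 (e.2.1 + 5) : Int),
           (PySem.List.bisectRight et.1 (e.2.2 + 5) : Int))))

-- ===== PRECONDITION & SPEC =====
-- total number of characters over all words (the length of A's character→word table)
def pvTotalChars (words : List String) : Nat := (words.map (fun w => w.toList.length)).sum

-- Pre_ admits exactly the inputs where every shifted boundary (span + 5) is a real character
-- position 0 ≤ pos < total. It excludes (a) inputs where A raises IndexError (a shifted boundary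
-- outside [-total, total)) and (b) entities with a NEGATIVE shifted boundary — a character
-- position before the text, on which A's value comes from Python's negative list indexing
-- wrapping around to the end of the text, while B rejects the position (ValueError).
def Pre_convert_entity (words : List String) (entities : List (String × (Int × Int))) : Prop :=
  ∀ e ∈ entities, (0 ≤ e.2.1 + 5 ∧ e.2.1 + 5 < (pvTotalChars words : Int)) ∧
    (0 ≤ e.2.2 + 5 ∧ e.2.2 + 5 < (pvTotalChars words : Int))
instance (words : List String) (entities : List (String × (Int × Int))) : Decidable (Pre_convert_entity words entities) := by unfold Pre_convert_entity; infer_instance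

def pvWitness_convert_entity : List String × (List (String × (Int × Int))) :=
  (["ab", "c"], [("x", (-5, -3))])

def Spec_convert_entity (words : List String) (entities : List (String × (Int × Int))) (out : List (String × (Int × Int))) : Prop := out = convert_entity_alt words entities
instance (words : List String) (entities : List (String × (Int × Int))) (out : List (String × (Int × Int))) : Decidable (Spec_convert_entity words entities out) := by unfold Spec_convert_entity; infer_instance

-- ===== CLAIM (what is proved, stated in full; the proofs are below) =====
def Claim_equal_convert_entity : Prop := ∀ (words : List String) (entities : List (String × (Int × Int))), Dom_convert_entity words entities → Pre_convert_entity words entities → Spec_convert_entity words entities (convert_entity words entities)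

-- ===== LEMMAS AND PROOFS =====

-- Proof-side recursive views of the two accumulations.
-- A's table, word indices starting at s:
def pvBuild : List String → Int → List Int
  | [], _ => []
  | w :: ws, s => List.replicate w.toList.length s ++ pvBuild ws (s + 1)

-- B's cumulative word-end positions, running total starting at t:
def pvPref : List String → Int → List Int
  | [], _ => []
  | w :: ws, t => (t + w.toList.length) :: pvPref ws (t + w.toList.length)

-- number of full words fitting before character index i (what both lookups compute)
def pvCountLE : List String → Nat → Nat
  | [], _ => 0
  | w :: ws, i => if w.toList.length ≤ i then pvCountLE ws (i - w.toList.length) + 1 else 0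

lemma pvBuild_loop (ws : List String) (s : Int) (acc : List Int) :
    (PySem.List.enumerate ws s).foldl
      (fun acc p => acc ++ List.replicate (PySem.Str.len p.2).toNat p.1) acc
      = acc ++ pvBuild ws s := by
  induction ws generalizing s acc with
  | nil => simp [PySem.List.enumerate_nil, pvBuild]
  | cons w ws ih =>
      rw [PySem.List.enumerate_cons, List.foldl_cons, ih]
      simp [pvBuild, PySem.Str.len, List.append_assoc]

lemma pvPref_loop (ws : List String) (p : List Int) (t : Int) :
    ws.foldl (fun pt w => (pt.1 ++ [pt.2 + PySem.Str.len w], pt.2 + PySem.Str.len w)) (p, t)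
      = (p ++ pvPref ws t, t + ((ws.map (fun w => w.toList.length)).sum : Nat)) := by
  induction ws generalizing p t with
  | nil => simp [pvPref]
  | cons w ws ih =>
      rw [List.foldl_cons, ih]
      refine Prod.ext ?_ ?_
      · simp [pvPref, PySem.Str.len, List.append_assoc]
      · simp [PySem.Str.len]; ring

lemma pvBuild_length (ws : List String) (s : Int) :
    (pvBuild ws s).length = pvTotalChars ws := by
  induction ws generalizing s with
  | nil => simp [pvBuild, pvTotalChars]
  | cons w ws ih => simp [pvBuild, pvTotalChars, ih]

lemma pvPref_ge (ws : List String) (t : Int) : ∀ p ∈ pvPref ws t, t ≤ p := by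
  induction ws generalizing t with
  | nil => simp [pvPref]
  | cons w ws ih =>
      intro p hp
      simp [pvPref] at hp
      rcases hp with h | h
      · omega
      · have := ih (t + w.toList.length) p h; omega

lemma pvPref_pairwise (ws : List String) (t : Int) :
    (pvPref ws t).Pairwise (fun a b => a ≤ b) := by
  induction ws generalizing t with
  | nil => simp [pvPref]
  | cons w ws ih =>
      refine List.Pairwise.cons ?_ (ih _)
      intro p hp
      have := pvPref_ge ws (t + w.toList.length) p hp
      omega

lemma pvBuild_getD (ws : List String) (s : Int) (i : Nat)
    (hi : i < pvTotalChars ws) :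
    (pvBuild ws s).getD i 0 = s + pvCountLE ws i := by
  induction ws generalizing s i with
  | nil => simp [pvTotalChars] at hi
  | cons w ws ih =>
      simp only [pvBuild, pvCountLE]
      by_cases h : w.toList.length ≤ i
      · have h' : w.length ≤ i := by simpa using h
        rw [List.getD_append_right _ _ _ _ (by simpa using h)]
        simp only [List.length_replicate]
        rw [ih (s + 1) (i - w.toList.length) (by simp [pvTotalChars] at hi ⊢; omega)]
        simp [h']
        ring
      · have h' : i < w.length := by simpa using Nat.lt_of_not_le h
        rw [List.getD_append _ _ _ _ (by simpa using Nat.lt_of_not_le h)]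
        simp [List.getD_eq_getElem?_getD, h', Nat.not_le_of_lt h']

lemma pvCountP_pref (ws : List String) (t : Int) (i : Nat) :
    (pvPref ws t).countP (fun p => decide (p ≤ t + i)) = pvCountLE ws i := by
  induction ws generalizing t i with
  | nil => simp [pvPref, pvCountLE]
  | cons w ws ih =>
      simp only [pvPref, pvCountLE, List.countP_cons]
      by_cases h : w.toList.length ≤ i
      · have h1 : t + (w.toList.length : Int) ≤ t + i := by
          have : (w.toList.length : Int) ≤ i := by exact_mod_cast h
          omega
        have h2 : (t + (w.toList.length : Int)) + ((i - w.toList.length : Nat) : Int) = t + i := by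
          push_cast [h]; ring
        rw [show (fun p => decide (p ≤ t + (i : Int))) = (fun p => decide (p ≤ (t + (w.toList.length : Int)) + ((i - w.toList.length : Nat) : Int))) from by
          funext p; rw [h2]]
        rw [ih]
        have h' : w.length ≤ i := by simpa using h
        simp [h']
      · have h1 : ¬ (t + (w.toList.length : Int) ≤ t + i) := by
          have : (i : Int) < w.toList.length := by exact_mod_cast Nat.lt_of_not_le h
          omega
        have h0 : (pvPref ws (t + w.toList.length)).countP (fun p => decide (p ≤ t + i)) = 0 := by
          rw [List.countP_eq_zero]
          intro p hp
          have := pvPref_ge ws (t + w.toList.length) p hp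
          simp; omega
        have h' : ¬ w.length ≤ i := by simpa using h
        rw [show (t + (w.toList.length : Int)) = (t + (w.length : Int)) by simp] at h0
        simp [h0, h']

-- bisect_right on a sorted list counts the elements ≤ x
lemma pvBisect_countP (a : List Int) (x : Int) (hs : a.Pairwise (fun p q => p ≤ q)) :
    PySem.List.bisectRight a x = a.countP (fun p => decide (p ≤ x)) := by
  obtain ⟨hle, hlt, hgt⟩ := PySem.List.bisectRight_spec a x hs
  set k := PySem.List.bisectRight a x with hk
  have hsplit : a = a.take k ++ a.drop k := (List.take_append_drop k a).symm
  rw [hsplit, List.countP_append]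
  have h1 : (a.take k).countP (fun p => decide (p ≤ x)) = k := by
    rw [List.countP_eq_length.mpr, List.length_take_of_le hle]
    intro p hp
    obtain ⟨j, hj, hje⟩ := List.mem_iff_getElem.mp hp
    have hj' : j < k ∧ j < a.length := by simpa using hj
    have : a[j]'hj'.2 = p := by simpa using hje
    simpa [← this] using hlt j hj'.2 hj'.1
  have h2 : (a.drop k).countP (fun p => decide (p ≤ x)) = 0 := by
    rw [List.countP_eq_zero]
    intro p hp
    obtain ⟨j, hj, hje⟩ := List.mem_iff_getElem.mp hp
    have hj' : j < a.length - k := by simpa using hj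
    have hjl : k + j < a.length := by omega
    have : a[k + j]'hjl = p := by simpa using hje
    have := hgt (k + j) hjl (by omega)
    simp; omega
  omega

-- the per-index core: A's table lookup equals B's binary search on any admitted position
lemma pvBoundary_eq (ws : List String) (i : Int)
    (h0 : 0 ≤ i) (hhi : i < (pvTotalChars ws : Int)) :
    PySem.List.pyGetD (pvBuild ws 0) i 0 = (PySem.List.bisectRight (pvPref ws 0) i : Int) := by
  have hlen : (pvBuild ws 0).length = pvTotalChars ws := pvBuild_length ws 0
  rw [PySem.List.pyGetD_eq_getElem _ 0 h0 (by rw [hlen]; omega),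
    ← List.getD_eq_getElem _ 0, pvBuild_getD ws 0 i.toNat (by omega)]
  rw [pvBisect_countP _ _ (pvPref_pairwise ws 0)]
  have h := pvCountP_pref ws 0 i.toNat
  rw [show (0 : Int) + ((i.toNat : Nat) : Int) = i by omega] at h
  rw [h]
  simp

-- both ports as maps over the entity list
lemma pvA_map (ws : List String) (es : List (String × (Int × Int))) :
    convert_entity ws es
      = es.map (fun e => (e.1, (PySem.List.pyGetD (pvBuild ws 0) (e.2.1 + 5) 0,
                                PySem.List.pyGetD (pvBuild ws 0) (e.2.2 + 5) 0))) := by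
  simp only [convert_entity]
  rw [pvBuild_loop ws 0 []]
  simp only [List.nil_append, PySem.List.foldl_append_singleton_eq_map]

lemma pvB_map (ws : List String) (es : List (String × (Int × Int))) :
    convert_entity_alt ws es
      = es.map (fun e => (e.1, ((PySem.List.bisectRight (pvPref ws 0) (e.2.1 + 5) : Int),
                                (PySem.List.bisectRight (pvPref ws 0) (e.2.2 + 5) : Int)))) := by
  simp only [convert_entity_alt]
  rw [pvPref_loop ws [] 0]
  simp only [List.nil_append]

-- ===== VERDICT (by name: the statement is the Claim_ definition above) =====
theorem convert_entity_spec : Claim_equal_convert_entity := by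
  intro words entities _hdom hpre
  show _ = _
  rw [pvA_map, pvB_map]
  apply List.map_congr_left
  intro e he
  obtain ⟨⟨h1a, h1b⟩, ⟨h2a, h2b⟩⟩ := hpre e he
  rw [pvBoundary_eq words (e.2.1 + 5) h1a h1b, pvBoundary_eq words (e.2.2 + 5) h2a h2b]
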